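-- pv_equiv track=rewrite | github.com/lifemapper/core | LmDbServer/tools/catalog_scen_package.py | _get_bio_name
-- ===== SOURCE A (Python) =====
-- def _get_bio_name(code, res, gcm=None, tm=None, alt_pred=None,
--                   lyr_type=None, suffix=None, is_title=False):
--     sep = '-'
--     if is_title:
--         sep = ', '
--     name = code
--     if lyr_type is not None:
--         name = sep.join((lyr_type, name))
--     for descriptor in (gcm, alt_pred, tm, res, suffix):
--         if descriptor is not None:
--             name = sep.join((name, descriptor))
--     return name
-- ===== SOURCE B (Python) =====
-- def _get_bio_name(code, res, gcm=None, tm=None, alt_pred=None,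
--                   lyr_type=None, suffix=None, is_title=False):
--     sep = ', ' if is_title else '-'
--
--     def build(parts):
--         # recursively build the name back-to-front; None parts vanish,
--         # returns None when no part remains
--         if not parts:
--             return None
--         rest = build(parts[1:])
--         head = parts[0]
--         if head is None:
--             return rest
--         if rest is None:
--             return head
--         return head + sep + rest
--
--     return build((lyr_type, code, gcm, alt_pred, tm, res, suffix))
-- ===== Notes on version B (the rewrite author's own statement) =====
-- stated objective: alternative
-- what changed: Replaces A's left-to-right accumulation via repeated pairwise sep.join calls with a recursion over the part tuple that assembles the name back-to-front by plain string concatenation, using an Optional accumulator and no join at all.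
import Mathlib
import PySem

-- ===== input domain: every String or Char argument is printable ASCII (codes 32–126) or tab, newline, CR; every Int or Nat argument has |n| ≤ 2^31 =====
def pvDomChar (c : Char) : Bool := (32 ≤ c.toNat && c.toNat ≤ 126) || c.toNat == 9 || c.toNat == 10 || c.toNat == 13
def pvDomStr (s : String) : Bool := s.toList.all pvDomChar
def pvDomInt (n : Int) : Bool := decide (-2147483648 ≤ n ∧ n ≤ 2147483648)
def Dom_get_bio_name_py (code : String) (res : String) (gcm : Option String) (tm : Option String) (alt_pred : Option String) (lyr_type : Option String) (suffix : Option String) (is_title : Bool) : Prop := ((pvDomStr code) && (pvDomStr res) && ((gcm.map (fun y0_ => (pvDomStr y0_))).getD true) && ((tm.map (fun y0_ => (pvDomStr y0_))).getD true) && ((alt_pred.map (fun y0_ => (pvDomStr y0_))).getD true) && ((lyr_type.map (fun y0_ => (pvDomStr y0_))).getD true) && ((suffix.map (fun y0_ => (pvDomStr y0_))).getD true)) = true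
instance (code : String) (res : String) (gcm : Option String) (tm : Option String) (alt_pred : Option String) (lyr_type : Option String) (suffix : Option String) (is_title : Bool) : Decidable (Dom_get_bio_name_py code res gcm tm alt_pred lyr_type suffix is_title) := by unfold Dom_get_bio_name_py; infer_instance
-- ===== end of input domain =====

-- B builds the name back-to-front by structural recursion over the part list with an
-- Optional accumulator and plain concatenation, instead of A's left-to-right repeated
-- pairwise sep.join accumulation (objective: alternative).
-- ===== PORT A =====
def get_bio_name_py (code : String) (res : String) (gcm : Option String) (tm : Option String) (alt_pred : Option String) (lyr_type : Option String) (suffix : Option String) (is_title : Bool) : String :=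
  let sep := if is_title then ", " else "-"
  let name := code
  let name := match lyr_type with
    | some t => PySem.Str.join sep [t, name]
    | none => name
  [gcm, alt_pred, tm, some res, suffix].foldl
    (fun n d => match d with
      | some x => PySem.Str.join sep [n, x]
      | none => n) name

-- ===== PORT B =====
-- build(parts): recursion on the list, combining head + sep + rest; None parts vanish.
def pvBuild (sep : String) : List (Option String) → Option String
  | [] => none
  | h :: t =>
    let rest := pvBuild sep t
    match h with
    | none => rest
    | some x =>
      match rest with
      | none => some x
      | some r => some (x ++ sep ++ r)

def get_bio_name_py_alt (code : String) (res : String) (gcm : Option String) (tm : Option String) (alt_pred : Option String) (lyr_type : Option String) (suffix : Option String) (is_title : Bool) : String :=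
  let sep := if is_title then ", " else "-"
  -- build always returns a value here since `code` is present; .getD "" only discharges the Option type
  (pvBuild sep [lyr_type, some code, gcm, alt_pred, tm, some res, suffix]).getD ""

-- ===== PRECONDITION & SPEC =====
def Spec_get_bio_name_py (code : String) (res : String) (gcm : Option String) (tm : Option String) (alt_pred : Option String) (lyr_type : Option String) (suffix : Option String) (is_title : Bool) (out : String) : Prop := out = get_bio_name_py_alt code res gcm tm alt_pred lyr_type suffix is_title
instance (code : String) (res : String) (gcm : Option String) (tm : Option String) (alt_pred : Option String) (lyr_type : Option String) (suffix : Option String) (is_title : Bool) (out : String) : Decidable (Spec_get_bio_name_py code res gcm tm alt_pred lyr_type suffix is_title out) := by unfold Spec_get_bio_name_py; infer_instance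

-- ===== CLAIM (what is proved, stated in full; the proofs are below) =====
def Claim_equal_get_bio_name_py : Prop := ∀ (code : String) (res : String) (gcm : Option String) (tm : Option String) (alt_pred : Option String) (lyr_type : Option String) (suffix : Option String) (is_title : Bool), Dom_get_bio_name_py code res gcm tm alt_pred lyr_type suffix is_title → Spec_get_bio_name_py code res gcm tm alt_pred lyr_type suffix is_title (get_bio_name_py code res gcm tm alt_pred lyr_type suffix is_title)

-- ===== LEMMAS AND PROOFS =====
lemma join_pair (sep a b : String) : PySem.Str.join sep [a, b] = a ++ sep ++ b := by
  simp [PySem.Str.join, PySem.Chars.join, List.intercalate, List.intersperse]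
  rw [String.append_assoc]

-- ===== VERDICT (by name: the statement is the Claim_ definition above) =====
theorem get_bio_name_py_spec : Claim_equal_get_bio_name_py := by
  intro code res gcm tm alt_pred lyr_type suffix is_title _
  show get_bio_name_py code res gcm tm alt_pred lyr_type suffix is_title
      = get_bio_name_py_alt code res gcm tm alt_pred lyr_type suffix is_title
  unfold get_bio_name_py get_bio_name_py_alt
  cases lyr_type <;> cases gcm <;> cases alt_pred <;> cases tm <;> cases suffix <;>
    simp [pvBuild, join_pair, String.append_assoc]
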